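-- pv_equiv track=rewrite | github.com/VuBui217/dailycodingchallenge | 2025/december/markdown_ordered_list_item_converter.py | convert_list_item
-- ===== SOURCE A (Python) =====
-- def convert_list_item(markdown):
--     line = markdown.strip()
--
--     i = 0
--     while i < len(line) and line[i].isdigit():
--         i += 1
--     # Must start with at least one number
--     if i == 0:
--         return "Invalid format"
--     # Expect a period
--     if i >= len(line) or line[i] != ".":
--         return "Invalid format"
--     i = i + 1
--     # Expect at least a space
--     if i >= len(line) or line[i] != " ":
--         return "Invalid format"
--
--     # Extract the text
--     text = line[i:].strip()
--
--     return f"<li>{text}</li>"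
-- ===== SOURCE B (Python) =====
-- import re
--
-- def convert_list_item(markdown):
--     line = markdown.strip()
--     m = re.match(r'\d+\. ', line)
--     if not m:
--         return "Invalid format"
--     return f"<li>{line[m.end():].strip()}</li>"
-- ===== Notes on version B (the rewrite author's own statement) =====
-- stated objective: idiomatic
-- what changed: Replaces the manual index-incrementing digit scan and three sequential guard branches with a single anchored regex match (\d+\. ) over the stripped line, extracting the text from the match end.
import Mathlib
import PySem

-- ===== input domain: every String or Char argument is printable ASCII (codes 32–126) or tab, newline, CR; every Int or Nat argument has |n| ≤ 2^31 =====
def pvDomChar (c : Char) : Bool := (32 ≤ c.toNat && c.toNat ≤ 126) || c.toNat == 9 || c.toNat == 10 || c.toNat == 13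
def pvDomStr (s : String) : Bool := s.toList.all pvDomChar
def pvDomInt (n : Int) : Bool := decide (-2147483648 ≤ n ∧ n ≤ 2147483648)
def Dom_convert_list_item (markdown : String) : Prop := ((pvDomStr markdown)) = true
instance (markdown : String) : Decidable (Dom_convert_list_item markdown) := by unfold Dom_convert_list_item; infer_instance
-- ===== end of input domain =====

-- B replaces A's manual digit-scanning while loop and three sequential guards by one
-- anchored regex-style match (digits, '.', ' ') over the same stripped line (idiomatic).

-- ===== PORT A =====
-- the while loop: i += 1 while i < len(line) and line[i].isdigit()
def convertListItemLoopA (line : List Char) (i : Nat) : Nat :=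
  if h : i < line.length then
    let c := line.get ⟨i, h⟩
    if PySem.Chars.strIsdigit [c] then convertListItemLoopA line (i + 1) else i
  else i
termination_by line.length - i

def convert_list_item (markdown : String) : String :=
  let line := PySem.Chars.strip markdown.toList
  let i := convertListItemLoopA line 0
  if i = 0 then "Invalid format"
  else if line.length ≤ i ∨ PySem.List.pyGet? line (i : Int) ≠ some '.' then "Invalid format"
  else
    let i := i + 1
    if line.length ≤ i ∨ PySem.List.pyGet? line (i : Int) ≠ some ' ' then "Invalid format"
    else
      let text := PySem.Chars.strip (PySem.List.slice line (some (i : Int)) none)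
      String.ofList ("<li>".toList ++ text ++ "</li>".toList)

-- ===== PORT B =====
-- re.match(r'\d+\. ', line): a maximal leading digit run followed by literally ". ";
-- text = line[m.end():].strip()
def convert_list_item_alt (markdown : String) : String :=
  let line := PySem.Chars.strip markdown.toList
  let ds := line.takeWhile (fun c => PySem.Chars.strIsdigit [c])
  match ds, line.drop ds.length with
  | _ :: _, '.' :: ' ' :: t => String.ofList ("<li>".toList ++ PySem.Chars.strip t ++ "</li>".toList)
  | _, _ => "Invalid format"

-- ===== PRECONDITION & SPEC =====
def Spec_convert_list_item (markdown : String) (out : String) : Prop := out = convert_list_item_alt markdown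
instance (markdown : String) (out : String) : Decidable (Spec_convert_list_item markdown out) := by unfold Spec_convert_list_item; infer_instance

-- ===== CLAIM (what is proved, stated in full; the proofs are below) =====
def Claim_equal_convert_list_item : Prop := ∀ (markdown : String), Dom_convert_list_item markdown → Spec_convert_list_item markdown (convert_list_item markdown)

-- ===== LEMMAS AND PROOFS =====

theorem loopA_eq_takeWhile (line : List Char) (i : Nat) :
    convertListItemLoopA line i = i + ((line.drop i).takeWhile (fun c => PySem.Chars.strIsdigit [c])).length := by
  fun_induction convertListItemLoopA line i with
  | case1 i h c hdig ih =>
    rw [List.drop_eq_getElem_cons h]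
    simp only [List.takeWhile_cons]
    split_ifs with hd
    · rw [ih]; simp; omega
    · exact absurd hdig hd
  | case2 i h c hdig =>
    rw [List.drop_eq_getElem_cons h]
    simp only [List.takeWhile_cons]
    split_ifs with hd
    · exact absurd hd hdig
    · simp
  | case3 i h =>
    rw [List.drop_eq_nil_iff.mpr (by omega)]
    simp

theorem strip_space_cons (t : List Char) : PySem.Chars.strip (' ' :: t) = PySem.Chars.strip t := by
  simp [PySem.Chars.strip, PySem.Chars.lstrip, PySem.Chars.isspace]

theorem pyGet?_cons_append_two (d : Char) (ds rest : List Char) :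
    PySem.List.pyGet? (d :: (ds ++ rest)) ((ds.length : Int) + 1 + 1) = rest[1]? := by
  have h : ((ds.length : Int) + 1 + 1) = ((ds.length + 2 : Nat) : Int) := by push_cast; ring
  rw [h, PySem.List.pyGet?_natCast]
  simp [List.getElem?_append_right]

theorem slice_cons_append_two (d : Char) (ds rest : List Char) :
    PySem.List.slice (d :: (ds ++ rest)) (some ((ds.length : Int) + 1 + 1)) none = rest.drop 1 := by
  have h : ((ds.length : Int) + 1 + 1) = ((ds.length + 2 : Nat) : Int) := by push_cast; ring
  rw [h, PySem.List.slice_from_natCast]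
  simp [List.drop_append]

theorem drop_takeWhile_len (p : Char → Bool) (l : List Char) :
    l.drop (l.takeWhile p).length = l.dropWhile p := by
  induction l with
  | nil => simp
  | cons a t ih => by_cases h : p a <;> simp [h, ih]

-- ===== VERDICT (by name: the statement is the Claim_ definition above) =====
theorem convert_list_item_spec : Claim_equal_convert_list_item := by
  intro markdown _
  show convert_list_item markdown = convert_list_item_alt markdown
  unfold convert_list_item convert_list_item_alt
  dsimp only
  generalize PySem.Chars.strip markdown.toList = line
  rw [loopA_eq_takeWhile]
  simp only [List.drop_zero, Nat.zero_add, drop_takeWhile_len]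
  rcases hds : line.takeWhile (fun c => PySem.Chars.strIsdigit [c]) with _ | ⟨d, ds'⟩
  · simp
  · rcases hrest : line.dropWhile (fun c => PySem.Chars.strIsdigit [c]) with _ | ⟨c, t⟩
    · have h := List.takeWhile_append_dropWhile (p := fun c => PySem.Chars.strIsdigit [c]) (l := line)
      rw [hds, hrest] at h
      simp only [List.append_nil] at h
      subst h
      simp
    · have h := List.takeWhile_append_dropWhile (p := fun c => PySem.Chars.strIsdigit [c]) (l := line)
      rw [hds, hrest] at h
      subst h
      by_cases hc : c = '.'
      · subst hc
        cases t with
        | nil => simp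
        | cons c2 t' =>
          by_cases h2 : c2 = ' '
          · subst h2
            simp [pyGet?_cons_append_two, slice_cons_append_two, strip_space_cons]
          · simp [h2, pyGet?_cons_append_two]
      · simp [hc]
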